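-- pv_equiv track=rewrite | github.com/henrietta/satella | satella/coding/sequences/sequences.py | add_next
-- ===== SOURCE A (Python) =====
-- import typing as tp
--
-- T = tp.TypeVar('T')
--
-- def add_next(lst: tp.Iterable[T], wrap_over: bool = False) -> tp.Generator[
--     tp.Tuple[T, tp.Optional[T]], None, None]:
--     """
--     Yields a 2-tuple of given iterable, presenting the next element as second element of the tuple.
--
--     The last element will be the last element alongside with a None, if wrap_over is False, or the
--     first element if wrap_over was True
--
--     Example:
--
--     >>> list(add_next([1, 2, 3, 4, 5])) == [(1, 2), (2, 3), (3, 4), (4, 5), (5, None)]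
--     >>> list(add_next([1, 2, 3, 4, 5], True)) == [(1, 2), (2, 3), (3, 4), (4, 5), (5, 1)]
--
--     :param lst: iterable to iterate over
--     :param wrap_over: whether to attach the first element to the pair of the last element instead
--         of None
--     """
--     iterator = iter(lst)
--     try:
--         first_val = prev_val = next(iterator)
--     except StopIteration:
--         return
--     for val in iterator:
--         yield prev_val, val
--         prev_val = val
--     if wrap_over:
--         yield prev_val, first_val
--     else:
--         yield prev_val, None
-- ===== SOURCE B (Python) =====
-- import typing as tp
--
-- T = tp.TypeVar('T')
--
-- def add_next(lst: tp.Iterable[T], wrap_over: bool = False) -> tp.Generator[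
--         tp.Tuple[T, tp.Optional[T]], None, None]:
--     items = list(lst)
--     if not items:
--         return
--     rest = items[1:] + ([items[0]] if wrap_over else [None])
--     yield from zip(items, rest)
-- ===== Notes on version B (the rewrite author's own statement) =====
-- stated objective: idiomatic
-- what changed: Replaces the streaming prev_val/first_val loop with materializing the list, building a shifted companion sequence (tail plus wrapped first element or None) and zipping the two.
import Mathlib
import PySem

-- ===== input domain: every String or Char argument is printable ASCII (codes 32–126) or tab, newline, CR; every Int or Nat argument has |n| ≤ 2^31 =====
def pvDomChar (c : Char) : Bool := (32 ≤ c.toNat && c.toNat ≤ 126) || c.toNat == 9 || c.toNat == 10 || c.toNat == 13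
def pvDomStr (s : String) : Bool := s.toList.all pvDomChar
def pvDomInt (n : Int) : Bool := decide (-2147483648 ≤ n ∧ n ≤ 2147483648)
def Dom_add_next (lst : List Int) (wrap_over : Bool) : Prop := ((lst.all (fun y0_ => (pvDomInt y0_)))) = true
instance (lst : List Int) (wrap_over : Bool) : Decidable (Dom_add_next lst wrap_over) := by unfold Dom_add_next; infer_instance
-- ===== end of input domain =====

-- B replaces A's streaming prev/first loop by zipping the list with its shifted tail (idiomatic decomposition; return value only).
-- ===== PORT A =====
-- the 'for val in iterator' loop of A: carries first_val and prev_val, then the wrap_over branch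
def addNextLoopA (first_val prev_val : Int) (rest : List Int) (wrap_over : Bool) :
    List (Int × Option Int) :=
  match rest with
  | [] => if wrap_over then [(prev_val, some first_val)] else [(prev_val, none)]
  | val :: vs => (prev_val, some val) :: addNextLoopA first_val val vs wrap_over

def add_next (lst : List Int) (wrap_over : Bool) : List (Int × Option Int) :=
  match lst with
  | [] => []  -- StopIteration on first next(): generator yields nothing
  | first_val :: iterator => addNextLoopA first_val first_val iterator wrap_over

-- ===== PORT B =====
def add_next_alt (lst : List Int) (wrap_over : Bool) : List (Int × Option Int) :=
  match lst with
  | [] => []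
  | first :: _ =>
      -- rest = items[1:] + ([items[0]] if wrap_over else [None]); zip(items, rest)
      lst.zip ((lst.drop 1).map some ++ [if wrap_over then some first else none])

-- ===== PRECONDITION & SPEC =====
def Spec_add_next (lst : List Int) (wrap_over : Bool) (out : List (Int × Option Int)) : Prop := out = add_next_alt lst wrap_over
instance (lst : List Int) (wrap_over : Bool) (out : List (Int × Option Int)) : Decidable (Spec_add_next lst wrap_over out) := by unfold Spec_add_next; infer_instance

-- ===== CLAIM (what is proved, stated in full; the proofs are below) =====
def Claim_equal_add_next : Prop := ∀ (lst : List Int) (wrap_over : Bool), Dom_add_next lst wrap_over → Spec_add_next lst wrap_over (add_next lst wrap_over)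

-- ===== LEMMAS AND PROOFS =====

-- ===== VERDICT (by name: the statement is the Claim_ definition above) =====
lemma loopA_eq_zip (first prev : Int) (rest : List Int) (wrap_over : Bool) :
    addNextLoopA first prev rest wrap_over =
      (prev :: rest).zip
        (rest.map some ++ [if wrap_over then some first else none]) := by
  induction rest generalizing prev with
  | nil => simp [addNextLoopA]; split_ifs <;> simp
  | cons v vs ih => simp [addNextLoopA, ih v]

theorem add_next_spec : Claim_equal_add_next := by
  intro lst wrap_over _
  unfold Spec_add_next add_next add_next_alt
  cases lst with
  | nil => rfl
  | cons x xs => simpa using loopA_eq_zip x x xs wrap_over
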